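-- pv_equiv track=rewrite | github.com/johny-b/arc-oocr | functions.py | spiral_rotate
-- ===== SOURCE A (Python) =====
-- def spiral_rotate(lst: list) -> list:
--     if len(lst) <= 1:
--         return lst
--
--     n = len(lst)
--     mid = n // 2
--     new_lst = [0] * n
--
--     for i in range(n):
--         if i < mid:
--             new_index = (i * 2 + 1) % n
--         else:
--             new_index = ((n - 1 - i) * 2) % n
--         new_lst[new_index] = lst[i]
--
--     return new_lst
-- ===== SOURCE B (Python) =====
-- def spiral_rotate(lst: list) -> list:
--     if len(lst) <= 1:
--         return lst
--     mid = len(lst) // 2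
--     first = lst[:mid]
--     second = lst[mid:][::-1]
--     out = []
--     for s, f in zip(second, first):
--         out.append(s)
--         out.append(f)
--     if len(first) < len(second):
--         out.append(second[-1])
--     return out
-- ===== Notes on version B (the rewrite author's own statement) =====
-- stated objective: simpler
-- what changed: Replaces A's scatter loop that computes a modular target index for every position and assigns into a preallocated zero list with a direct split of the list into two halves and an interleave of the reversed second half with the first half (plus the odd leftover).
import Mathlib
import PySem

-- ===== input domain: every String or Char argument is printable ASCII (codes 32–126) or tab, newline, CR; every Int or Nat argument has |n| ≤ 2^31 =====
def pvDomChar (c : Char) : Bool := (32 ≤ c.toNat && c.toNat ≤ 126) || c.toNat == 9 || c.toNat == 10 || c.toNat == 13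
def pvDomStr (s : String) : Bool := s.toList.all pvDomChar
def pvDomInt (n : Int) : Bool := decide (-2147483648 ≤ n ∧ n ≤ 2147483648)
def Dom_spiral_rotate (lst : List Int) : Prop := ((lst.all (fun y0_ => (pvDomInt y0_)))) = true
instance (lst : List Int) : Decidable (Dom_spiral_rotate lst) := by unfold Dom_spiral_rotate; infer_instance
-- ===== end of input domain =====

-- B replaces A's computed-index scatter assignment by splitting the list in two halves and
-- interleaving the reversed second half with the first half (objective: simpler, same O(n) cost).

-- ===== PORT A =====
def spiral_rotate (lst : List Int) : List Int :=
  if lst.length ≤ 1 then lst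
  else
    let n : Int := lst.length
    let mid : Int := PySem.Int.floordiv n 2
    (PySem.List.pyRange 0 n 1).foldl
      (fun acc i =>
        let newIndex : Int :=
          if i < mid then PySem.Int.mod (i * 2 + 1) n
          else PySem.Int.mod ((n - 1 - i) * 2) n
        PySem.List.pySetD acc newIndex (PySem.List.pyGetD lst i 0))
      (List.replicate lst.length 0)

-- ===== PORT B =====
def spiral_rotate_alt (lst : List Int) : List Int :=
  if lst.length ≤ 1 then lst
  else
    let mid : Nat := lst.length / 2
    let first := PySem.List.slice lst none (some (mid : Int))
    let second := (PySem.List.slice lst (some (mid : Int)) none).reverse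
    let out := (second.zip first).foldl (fun acc p => acc ++ [p.1, p.2]) []
    -- second[-1]: always in range here, since second is nonempty when lst.length ≥ 2
    if first.length < second.length then out ++ [PySem.List.pyGetD second (-1) 0] else out

-- ===== PRECONDITION & SPEC =====
def Spec_spiral_rotate (lst : List Int) (out : List Int) : Prop := out = spiral_rotate_alt lst
instance (lst : List Int) (out : List Int) : Decidable (Spec_spiral_rotate lst out) := by unfold Spec_spiral_rotate; infer_instance

-- ===== CLAIM (what is proved, stated in full; the proofs are below) =====
def Claim_equal_spiral_rotate : Prop := ∀ (lst : List Int), Dom_spiral_rotate lst → Spec_spiral_rotate lst (spiral_rotate lst)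

-- ===== LEMMAS AND PROOFS =====

-- index written by A's loop at source position k (Nat form)
def Fidx (n k : Nat) : Nat := if k < n / 2 then 2 * k + 1 else 2 * (n - 1 - k)

-- interleaving of two lists, element by element
def ilv (a b : List Int) : List Int := (a.zip b).flatMap (fun p => [p.1, p.2])

lemma ilv_cons (x y : Int) (a b : List Int) : ilv (x :: a) (y :: b) = x :: y :: ilv a b := rfl

lemma ilv_length : ∀ (a b : List Int), (ilv a b).length = 2 * min a.length b.length := by
  intro a
  induction a with
  | nil => intro b; simp [ilv]
  | cons x a ih =>
    intro b
    cases b with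
    | nil => simp [ilv]
    | cons y b => rw [ilv_cons]; simp only [List.length_cons, ih]; omega

lemma ilv_get_even : ∀ (a b : List Int) (k : Nat), k < a.length → k < b.length →
    (ilv a b)[2 * k]? = a[k]? := by
  intro a
  induction a with
  | nil => intro b k hk _; simp at hk
  | cons x a ih =>
    intro b k hk1 hk2
    cases b with
    | nil => simp at hk2
    | cons y b =>
      rw [ilv_cons]
      cases k with
      | zero => simp
      | succ k =>
        have h2 : 2 * (k + 1) = (2 * k + 1) + 1 := by ring
        rw [h2]
        simp only [List.getElem?_cons_succ]
        exact ih b k (by simpa using hk1) (by simpa using hk2)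

lemma ilv_get_odd : ∀ (a b : List Int) (k : Nat), k < a.length → k < b.length →
    (ilv a b)[2 * k + 1]? = b[k]? := by
  intro a
  induction a with
  | nil => intro b k hk _; simp at hk
  | cons x a ih =>
    intro b k hk1 hk2
    cases b with
    | nil => simp at hk2
    | cons y b =>
      rw [ilv_cons]
      cases k with
      | zero => simp
      | succ k =>
        have h2 : 2 * (k + 1) + 1 = ((2 * k + 1) + 1) + 1 := by ring
        rw [h2]
        simp only [List.getElem?_cons_succ]
        exact ih b k (by simpa using hk1) (by simpa using hk2)

lemma length_foldl_set (f : Nat → Nat) (g : Nat → Int) :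
    ∀ (is : List Nat) (init : List Int),
      (is.foldl (fun acc i => acc.set (f i) (g i)) init).length = init.length := by
  intro is
  induction is with
  | nil => intro init; rfl
  | cons a t ih => intro init; simp only [List.foldl_cons]; rw [ih]; simp

-- element of a scatter loop: no write hits j
lemma get_foldl_set_miss (f : Nat → Nat) (g : Nat → Int) :
    ∀ (is : List Nat) (init : List Int) (j : Nat), (∀ i ∈ is, f i ≠ j) →
      (is.foldl (fun acc i => acc.set (f i) (g i)) init)[j]? = init[j]? := by
  intro is
  induction is with
  | nil => intro init j _; rfl
  | cons a t ih =>
    intro init j h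
    simp only [List.foldl_cons]
    rw [ih _ j (fun i hi => h i (List.mem_cons_of_mem _ hi))]
    rw [List.getElem?_set_ne (h a List.mem_cons_self)]

-- element of a scatter loop: exactly one write hits j
lemma get_foldl_set_hit (f : Nat → Nat) (g : Nat → Int) :
    ∀ (is : List Nat) (init : List Int) (j i : Nat), i ∈ is → f i = j → j < init.length →
      (∀ i' ∈ is, f i' = j → i' = i) →
      (is.foldl (fun acc i => acc.set (f i) (g i)) init)[j]? = some (g i) := by
  intro is
  induction is with
  | nil => intro _ _ _ h; cases h
  | cons a t ih =>
    intro init j i hmem hfi hj huniq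
    simp only [List.foldl_cons]
    by_cases hat : i ∈ t
    · exact ih _ j i hat hfi (by simpa using hj)
        (fun i' hi' => huniq i' (List.mem_cons_of_mem _ hi'))
    · have hia : i = a := by
        rcases List.mem_cons.mp hmem with h | h
        · exact h
        · exact absurd h hat
      subst hia
      have hmiss : ∀ i' ∈ t, f i' ≠ j := by
        intro i' hi' hcontra
        exact hat (huniq i' (List.mem_cons_of_mem _ hi') hcontra ▸ hi')
      rw [get_foldl_set_miss f g t _ j hmiss, hfi]
      simp [hj]

lemma getD_eq_some (lst : List Int) (i : Nat) (hi : i < lst.length) :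
    lst[i]? = some (lst.getD i 0) := by
  rw [List.getD_eq_getElem?_getD, List.getElem?_eq_getElem hi]
  rfl

lemma rev_drop_get (lst : List Int) (m k : Nat) (hk : k < lst.length - m) :
    ((lst.drop m).reverse)[k]? = lst[lst.length - 1 - k]? := by
  rw [List.getElem?_reverse (by simp [List.length_drop]; omega)]
  rw [List.getElem?_drop]
  have h : m + ((lst.drop m).length - 1 - k) = lst.length - 1 - k := by
    simp [List.length_drop]; omega
  rw [h]

-- A's branch for lst.length ≥ 2, restated as a Nat-indexed scatter fold
lemma A_scatter (lst : List Int) (h2 : 2 ≤ lst.length) :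
    spiral_rotate lst =
      (List.range lst.length).foldl
        (fun acc k => acc.set (Fidx lst.length k) (lst.getD k 0))
        (List.replicate lst.length 0) := by
  have hn : ¬ lst.length ≤ 1 := by omega
  simp only [spiral_rotate]
  rw [if_neg hn]
  rw [PySem.List.pyRange_one]
  simp only [sub_zero, Int.toNat_natCast]
  rw [List.foldl_map]
  apply PySem.List.foldl_congr_mem
  intro acc k hk
  have hk' : k < lst.length := List.mem_range.mp hk
  simp only [zero_add]
  have hmid : PySem.Int.floordiv (lst.length : Int) 2 = ((lst.length / 2 : Nat) : Int) := by
    exact_mod_cast PySem.Int.floordiv_natCast lst.length 2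
  rw [hmid]
  by_cases hc : k < lst.length / 2
  · rw [if_pos (by exact_mod_cast hc)]
    have hmod : PySem.Int.mod ((k : Int) * 2 + 1) (lst.length : Int) = ((2 * k + 1 : Nat) : Int) := by
      rw [PySem.Int.mod_eq_emod_of_pos (by omega), Int.emod_eq_of_lt (by omega) (by omega)]
      omega
    rw [hmod, PySem.List.pySetD_natCast, PySem.List.pyGetD_natCast]
    simp [Fidx, hc]
  · rw [if_neg (by
      intro hcon
      exact hc (by exact_mod_cast hcon))]
    have hmod : PySem.Int.mod (((lst.length : Int) - 1 - (k : Int)) * 2) (lst.length : Int)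
        = ((2 * (lst.length - 1 - k) : Nat) : Int) := by
      rw [PySem.Int.mod_eq_emod_of_pos (by omega), Int.emod_eq_of_lt (by omega) (by omega)]
      omega
    rw [hmod, PySem.List.pySetD_natCast, PySem.List.pyGetD_natCast]
    simp [Fidx, hc]

-- B's branch for lst.length ≥ 2, with the slices and the final append resolved
lemma B_char (lst : List Int) (h2 : 2 ≤ lst.length) :
    spiral_rotate_alt lst =
      if lst.length % 2 = 1
      then ilv ((lst.drop (lst.length / 2)).reverse) (lst.take (lst.length / 2))
            ++ [lst.getD (lst.length / 2) 0]
      else ilv ((lst.drop (lst.length / 2)).reverse) (lst.take (lst.length / 2)) := by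
  have hn : ¬ lst.length ≤ 1 := by omega
  simp only [spiral_rotate_alt]
  rw [if_neg hn]
  rw [PySem.List.slice_to_natCast, PySem.List.slice_from_natCast]
  rw [PySem.List.foldl_append_eq_flatMap]
  have hlens : ((lst.drop (lst.length / 2)).reverse).length = lst.length - lst.length / 2 := by
    simp
  have hlenf : (lst.take (lst.length / 2)).length = lst.length / 2 := by
    simp [List.length_take]; omega
  have hcond : ((lst.take (lst.length / 2)).length < ((lst.drop (lst.length / 2)).reverse).length)
      ↔ lst.length % 2 = 1 := by
    rw [hlens, hlenf]; omega
  by_cases hpar : lst.length % 2 = 1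
  · rw [if_pos (hcond.mpr hpar), if_pos hpar]
    have hne : ((lst.drop (lst.length / 2)).reverse) ≠ [] := by
      intro hcon
      have := congrArg List.length hcon
      rw [hlens] at this
      simp at this
      omega
    rw [PySem.List.pyGetD_neg_one _ _ hne]
    have hlast : ((lst.drop (lst.length / 2)).reverse).getLast? = some (lst.getD (lst.length / 2) 0) := by
      rw [List.getLast?_reverse, List.head?_eq_getElem?, List.getElem?_drop]
      have : lst.length / 2 + 0 = lst.length / 2 := by omega
      rw [this]
      exact getD_eq_some lst _ (by omega)
    have hlast2 : ((lst.drop (lst.length / 2)).reverse).getLast? =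
        some (((lst.drop (lst.length / 2)).reverse).getLast hne) := List.getLast?_eq_some_getLast hne
    rw [hlast2] at hlast
    simp only [Option.some.injEq] at hlast
    rw [hlast]
    rfl
  · rw [if_neg (fun hcon => hpar (hcond.mp hcon)), if_neg hpar]
    rfl

-- A = B on every input
lemma AB_eq (lst : List Int) : spiral_rotate lst = spiral_rotate_alt lst := by
  by_cases h : lst.length ≤ 1
  · simp only [spiral_rotate, spiral_rotate_alt, if_pos h]
  · have h2 : 2 ≤ lst.length := by omega
    rw [A_scatter lst h2, B_char lst h2]
    have hlenA : ((List.range lst.length).foldl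
        (fun acc k => acc.set (Fidx lst.length k) (lst.getD k 0))
        (List.replicate lst.length 0)).length = lst.length := by
      rw [length_foldl_set]; simp
    have hlens : ((lst.drop (lst.length / 2)).reverse).length = lst.length - lst.length / 2 := by
      simp
    have hlenf : (lst.take (lst.length / 2)).length = lst.length / 2 := by
      simp [List.length_take]; omega
    have hilv : (ilv ((lst.drop (lst.length / 2)).reverse) (lst.take (lst.length / 2))).length
        = 2 * (lst.length / 2) := by
      rw [ilv_length, hlens, hlenf]; omega
    -- the j-th element of A's scatter result
    have hA : ∀ (j : Nat), j < lst.length →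
        ((List.range lst.length).foldl
          (fun acc k => acc.set (Fidx lst.length k) (lst.getD k 0))
          (List.replicate lst.length 0))[j]? =
        some (lst.getD (if j % 2 = 1 then j / 2 else lst.length - 1 - j / 2) 0) := by
      intro j hj
      by_cases hodd : j % 2 = 1
      · rw [if_pos hodd]
        apply get_foldl_set_hit (Fidx lst.length) (fun k => lst.getD k 0)
          (List.range lst.length) (List.replicate lst.length 0) j (j / 2)
          (List.mem_range.mpr (by omega))
          (by unfold Fidx; rw [if_pos (by omega)]; omega)
          (by simp; omega)
        intro i' hi' hfi
        have hi'' : i' < lst.length := List.mem_range.mp hi'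
        unfold Fidx at hfi
        by_cases hci : i' < lst.length / 2
        · rw [if_pos hci] at hfi; omega
        · rw [if_neg hci] at hfi; omega
      · rw [if_neg hodd]
        apply get_foldl_set_hit (Fidx lst.length) (fun k => lst.getD k 0)
          (List.range lst.length) (List.replicate lst.length 0) j (lst.length - 1 - j / 2)
          (List.mem_range.mpr (by omega))
          (by unfold Fidx; rw [if_neg (by omega)]; omega)
          (by simp; omega)
        intro i' hi' hfi
        have hi'' : i' < lst.length := List.mem_range.mp hi'
        unfold Fidx at hfi
        by_cases hci : i' < lst.length / 2
        · rw [if_pos hci] at hfi; omega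
        · rw [if_neg hci] at hfi; omega
    by_cases hpar : lst.length % 2 = 1
    · rw [if_pos hpar]
      apply List.ext_getElem?
      intro j
      by_cases hj : j < lst.length
      · rw [hA j hj]
        by_cases hodd : j % 2 = 1
        · rw [if_pos hodd]
          have hjlt : j < (ilv ((lst.drop (lst.length / 2)).reverse) (lst.take (lst.length / 2))).length := by
            rw [hilv]; omega
          rw [List.getElem?_append_left hjlt]
          have hj2 : j = 2 * (j / 2) + 1 := by omega
          rw [hj2, ilv_get_odd _ _ _ (by rw [hlens]; omega) (by rw [hlenf]; omega)]
          rw [List.getElem?_take, if_pos (by omega)]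
          rw [getD_eq_some lst (j / 2) (by omega)]
          have hx : (2 * (j / 2) + 1) / 2 = j / 2 := by omega
          rw [hx]
        · rw [if_neg hodd]
          by_cases hmidj : j / 2 < lst.length / 2
          · have hjlt : j < (ilv ((lst.drop (lst.length / 2)).reverse) (lst.take (lst.length / 2))).length := by
              rw [hilv]; omega
            rw [List.getElem?_append_left hjlt]
            have hj2 : j = 2 * (j / 2) := by omega
            rw [hj2, ilv_get_even _ _ _ (by rw [hlens]; omega) (by rw [hlenf]; omega)]
            rw [rev_drop_get lst _ _ (by omega)]
            rw [getD_eq_some lst (lst.length - 1 - j / 2) (by omega)]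
            have hx : 2 * (j / 2) / 2 = j / 2 := by omega
            rw [hx]
          · -- j = 2 * (lst.length / 2), the appended leftover
            have hjeq : j = 2 * (lst.length / 2) := by omega
            rw [List.getElem?_append_right (by rw [hilv]; omega)]
            rw [hilv]
            have h0 : j - 2 * (lst.length / 2) = 0 := by omega
            rw [h0]
            have hmid : lst.length - 1 - j / 2 = lst.length / 2 := by omega
            rw [hmid]
            rfl
      · have hle : lst.length ≤ j := by omega
        rw [List.getElem?_eq_none (by rw [hlenA]; omega)]
        rw [List.getElem?_eq_none (by simp [hilv]; omega)]
    · rw [if_neg hpar]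
      apply List.ext_getElem?
      intro j
      by_cases hj : j < lst.length
      · rw [hA j hj]
        by_cases hodd : j % 2 = 1
        · rw [if_pos hodd]
          have hj2 : j = 2 * (j / 2) + 1 := by omega
          rw [hj2, ilv_get_odd _ _ _ (by rw [hlens]; omega) (by rw [hlenf]; omega)]
          rw [List.getElem?_take, if_pos (by omega)]
          rw [getD_eq_some lst (j / 2) (by omega)]
          have hx : (2 * (j / 2) + 1) / 2 = j / 2 := by omega
          rw [hx]
        · rw [if_neg hodd]
          have hj2 : j = 2 * (j / 2) := by omega
          rw [hj2, ilv_get_even _ _ _ (by rw [hlens]; omega) (by rw [hlenf]; omega)]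
          rw [rev_drop_get lst _ _ (by omega)]
          rw [getD_eq_some lst (lst.length - 1 - j / 2) (by omega)]
          have hx : 2 * (j / 2) / 2 = j / 2 := by omega
          rw [hx]
      · rw [List.getElem?_eq_none (by rw [hlenA]; omega)]
        rw [List.getElem?_eq_none (by rw [hilv]; omega)]

-- ===== VERDICT (by name: the statement is the Claim_ definition above) =====
theorem spiral_rotate_spec : Claim_equal_spiral_rotate := by
  intro lst _
  unfold Spec_spiral_rotate
  exact AB_eq lst
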